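-- pv_equiv track=rewrite | github.com/yuchokr/masthesis | cellpose2d_overlap.py | make_disk_offsets
-- ===== SOURCE A (Python) =====
-- def make_disk_offsets(radius):
--     offsets = []
--     r2 = radius * radius
--     for dy in range(-radius, radius + 1):
--         for dx in range(-radius, radius + 1):
--             if dx * dx + dy * dy <= r2:
--                 offsets.append((dy, dx))
--     return offsets
-- ===== SOURCE B (Python) =====
-- def make_disk_offsets(radius):
--     offsets = []
--     r2 = radius * radius
--     for dy in range(-radius, radius + 1):
--         k = r2 - dy * dy
--         m = 0
--         while (m + 1) * (m + 1) <= k: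
--             m += 1
--         offsets.extend((dy, dx) for dx in range(-m, m + 1))
--     return offsets
-- ===== Notes on version B (the rewrite author's own statement) =====
-- stated objective: alternative
-- what changed: Per row dy, B computes the exact half-width m = floor(sqrt(r^2-dy^2)) by an incremental integer square root and emits the interval range(-m, m+1) directly, eliminating A's inner per-point distance test over the whole square.
import Mathlib
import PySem

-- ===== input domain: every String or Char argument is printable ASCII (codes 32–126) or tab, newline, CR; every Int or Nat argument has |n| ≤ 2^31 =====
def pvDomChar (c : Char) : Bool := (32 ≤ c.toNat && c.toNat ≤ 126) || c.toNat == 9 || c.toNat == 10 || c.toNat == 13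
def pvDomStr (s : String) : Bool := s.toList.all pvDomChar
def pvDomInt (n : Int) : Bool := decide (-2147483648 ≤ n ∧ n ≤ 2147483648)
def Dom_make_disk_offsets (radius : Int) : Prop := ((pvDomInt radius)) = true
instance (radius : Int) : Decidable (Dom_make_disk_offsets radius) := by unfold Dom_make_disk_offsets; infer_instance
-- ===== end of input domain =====

-- B replaces A's per-point distance test over the whole square by emitting, for each row dy,
-- the exact interval [-m, m] with m the integer square root of r^2 - dy^2 (alternative algorithm).

-- ===== PORT A =====
def make_disk_offsets (radius : Int) : List (Int × Int) :=
  let r2 := radius * radius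
  (PySem.List.pyRange (-radius) (radius + 1) 1).foldl (fun offsets dy =>
    (PySem.List.pyRange (-radius) (radius + 1) 1).foldl (fun offsets dx =>
      if dx * dx + dy * dy ≤ r2 then offsets ++ [(dy, dx)] else offsets) offsets) []

-- ===== PORT B =====
-- 'while (m+1)*(m+1) <= k: m += 1' ported with a fuel bound (k.toNat steps always suffice)
def pvIsqrtAux : Nat → Int → Int → Int
  | 0, m, _ => m
  | fuel + 1, m, k => if (m + 1) * (m + 1) ≤ k then pvIsqrtAux fuel (m + 1) k else m

def make_disk_offsets_alt (radius : Int) : List (Int × Int) :=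
  let r2 := radius * radius
  (PySem.List.pyRange (-radius) (radius + 1) 1).foldl (fun offsets dy =>
    let k := r2 - dy * dy
    let m := pvIsqrtAux k.toNat 0 k
    offsets ++ (PySem.List.pyRange (-m) (m + 1) 1).map (fun dx => (dy, dx))) []

-- ===== PRECONDITION & SPEC =====
def Spec_make_disk_offsets (radius : Int) (out : List (Int × Int)) : Prop := out = make_disk_offsets_alt radius
instance (radius : Int) (out : List (Int × Int)) : Decidable (Spec_make_disk_offsets radius out) := by unfold Spec_make_disk_offsets; infer_instance

-- ===== CLAIM (what is proved, stated in full; the proofs are below) =====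
def Claim_equal_make_disk_offsets : Prop := ∀ (radius : Int), Dom_make_disk_offsets radius → Spec_make_disk_offsets radius (make_disk_offsets radius)

-- ===== LEMMAS AND PROOFS =====

theorem pvIsqrtAux_spec (k : Int) : ∀ (fuel : Nat) (m : Int), 0 ≤ m → m * m ≤ k →
    k < (m + fuel + 1) * (m + fuel + 1) →
    0 ≤ pvIsqrtAux fuel m k ∧ pvIsqrtAux fuel m k * pvIsqrtAux fuel m k ≤ k ∧
      k < (pvIsqrtAux fuel m k + 1) * (pvIsqrtAux fuel m k + 1) := by
  intro fuel
  induction fuel with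
  | zero =>
    intro m h0 hl hu
    simp only [pvIsqrtAux]
    refine ⟨h0, hl, ?_⟩
    push_cast at hu; nlinarith
  | succ n ih =>
    intro m h0 hl hu
    simp only [pvIsqrtAux]
    split_ifs with h
    · exact ih (m + 1) (by omega) h (by push_cast at hu ⊢; nlinarith)
    · exact ⟨h0, hl, by omega⟩

theorem pvIsqrt_spec (k : Int) (hk : 0 ≤ k) :
    0 ≤ pvIsqrtAux k.toNat 0 k ∧ pvIsqrtAux k.toNat 0 k * pvIsqrtAux k.toNat 0 k ≤ k ∧
      k < (pvIsqrtAux k.toNat 0 k + 1) * (pvIsqrtAux k.toNat 0 k + 1) := by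
  apply pvIsqrtAux_spec k k.toNat 0 le_rfl (by nlinarith)
  have : (k.toNat : Int) = k := Int.toNat_of_nonneg hk
  nlinarith

theorem row_eq (r dy : Int) (h1 : -r ≤ dy) (h2 : dy ≤ r) :
    (PySem.List.pyRange (-r) (r + 1) 1).filter (fun dx => decide (dx * dx + dy * dy ≤ r * r))
      = PySem.List.pyRange (-(pvIsqrtAux (r * r - dy * dy).toNat 0 (r * r - dy * dy)))
          (pvIsqrtAux (r * r - dy * dy).toNat 0 (r * r - dy * dy) + 1) 1 := by
  have hr : 0 ≤ r := by omega
  set k := r * r - dy * dy with hk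
  have hk0 : 0 ≤ k := by nlinarith
  obtain ⟨hm0, hml, hmu⟩ := pvIsqrt_spec k hk0
  set m := pvIsqrtAux k.toNat 0 k with hm
  have hmr : m ≤ r := by nlinarith
  have key : ∀ dx : Int, (dx * dx + dy * dy ≤ r * r) ↔ (-m ≤ dx ∧ dx ≤ m) := by
    intro dx
    constructor
    · intro h
      have hdx : dx * dx ≤ k := by omega
      constructor <;> nlinarith
    · rintro ⟨ha, hb⟩
      nlinarith
  rw [PySem.List.pyRange_one_append (-r) (-m) (r + 1) (by omega) (by omega),
      PySem.List.pyRange_one_append (-m) (m + 1) (r + 1) (by omega) (by omega),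
      List.filter_append, List.filter_append]
  have e1 : (PySem.List.pyRange (-r) (-m) 1).filter (fun dx => decide (dx * dx + dy * dy ≤ r * r)) = [] := by
    rw [List.filter_eq_nil_iff]
    intro x hx
    rw [PySem.List.mem_pyRange_one] at hx
    simp only [decide_eq_true_eq]
    intro hc
    exact absurd ((key x).mp hc) (by omega)
  have e2 : (PySem.List.pyRange (-m) (m + 1) 1).filter (fun dx => decide (dx * dx + dy * dy ≤ r * r))
      = PySem.List.pyRange (-m) (m + 1) 1 := by
    rw [List.filter_eq_self]
    intro x hx
    rw [PySem.List.mem_pyRange_one] at hx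
    simp only [decide_eq_true_eq]
    exact (key x).mpr ⟨hx.1, by omega⟩
  have e3 : (PySem.List.pyRange (m + 1) (r + 1) 1).filter (fun dx => decide (dx * dx + dy * dy ≤ r * r)) = [] := by
    rw [List.filter_eq_nil_iff]
    intro x hx
    rw [PySem.List.mem_pyRange_one] at hx
    simp only [decide_eq_true_eq]
    intro hc
    exact absurd ((key x).mp hc) (by omega)
  rw [e1, e2, e3]
  simp

-- flatMap respects pointwise-equal-on-members functions
theorem flatMap_congr_mem {α β : Type} (l : List α) (f g : α → List β)
    (h : ∀ x ∈ l, f x = g x) : l.flatMap f = l.flatMap g := by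
  induction l with
  | nil => rfl
  | cons a t ih =>
    simp only [List.flatMap_cons]
    rw [h a (by simp), ih (fun x hx => h x (by simp [hx]))]

-- ===== VERDICT (by name: the statement is the Claim_ definition above) =====
theorem make_disk_offsets_spec : Claim_equal_make_disk_offsets := by
  intro radius _
  unfold Spec_make_disk_offsets make_disk_offsets make_disk_offsets_alt
  rw [PySem.List.foldl_congr_mem (PySem.List.pyRange (-radius) (radius + 1) 1) _
        (fun offsets dy => offsets ++
          ((PySem.List.pyRange (-radius) (radius + 1) 1).filter
            (fun dx => decide (dx * dx + dy * dy ≤ radius * radius))).map (fun dx => (dy, dx)))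
        [] (fun acc dy _ => PySem.List.foldl_append_ite _ _ _ _),
      PySem.List.foldl_append_eq_flatMap, PySem.List.foldl_append_eq_flatMap]
  simp only [List.nil_append]
  apply flatMap_congr_mem
  intro dy hdy
  rw [PySem.List.mem_pyRange_one] at hdy
  rw [row_eq radius dy hdy.1 (by omega)]
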